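-- pv_equiv track=rewrite | github.com/bytesFalling/Peerin-number | peerin_numbre.py | peerin
-- ===== SOURCE A (Python) =====
-- def peerin( n ):
--     if ( n== 0):
--         return 3
--     if (n == 1):
--         return 0
--     if (n == 2):
--         return 2
--     return peerin(n - 2) + peerin(n - 3)
-- ===== SOURCE B (Python) =====
-- def peerin(n):
--     a, b, c = 3, 0, 2
--     for _ in range(n - 2):
--         a, b, c = b, c, a + b
--     return a if n == 0 else (b if n == 1 else c)
-- ===== Notes on version B (the rewrite author's own statement) =====
-- stated objective: alternative
-- what changed: Replaced the exponential ternary recursion with a single bottom-up loop keeping the last three values of the recurrence.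
import Mathlib
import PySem

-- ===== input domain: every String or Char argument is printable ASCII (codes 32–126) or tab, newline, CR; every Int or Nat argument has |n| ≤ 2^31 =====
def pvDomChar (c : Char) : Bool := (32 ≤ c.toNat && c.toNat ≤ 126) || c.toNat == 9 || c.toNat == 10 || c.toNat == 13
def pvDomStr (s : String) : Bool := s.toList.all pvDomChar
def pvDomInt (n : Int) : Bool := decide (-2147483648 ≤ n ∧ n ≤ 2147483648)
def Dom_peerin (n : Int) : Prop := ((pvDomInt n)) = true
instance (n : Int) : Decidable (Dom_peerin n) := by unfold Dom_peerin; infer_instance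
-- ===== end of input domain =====

-- B replaces A's exponential three-way recursion by a bottom-up loop keeping
-- the last three values of the recurrence. Return-value equivalence on n >= 0.

-- ===== PORT A =====
-- A's recursion, step for step, on the Nat magnitude of n (Pre_ restricts to n ≥ 0,
-- where the Int recursion and this Nat recursion coincide).
def peerinNat : Nat → Int
  | 0 => 3
  | 1 => 0
  | 2 => 2
  | (m + 3) => peerinNat (m + 1) + peerinNat m

def peerin (n : Int) : Int := peerinNat n.toNat

-- ===== PORT B =====
-- the loop body: a, b, c = b, c, a + b
def peerinStep : Int × Int × Int → Int × Int × Int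
  | (a, b, c) => (b, c, a + b)

-- for _ in range(n-2): ...  starting from (3, 0, 2)
def peerinIter (k : Nat) : Int × Int × Int :=
  (List.range k).foldl (fun s _ => peerinStep s) (3, 0, 2)

def peerin_alt (n : Int) : Int :=
  let s := peerinIter (n - 2).toNat
  if n = 0 then s.1 else if n = 1 then s.2.1 else s.2.2

-- ===== PRECONDITION & SPEC =====
-- Pre_ excludes n < 0, on which Python A recurses forever (RecursionError).
def Pre_peerin (n : Int) : Prop := 0 ≤ n
instance (n : Int) : Decidable (Pre_peerin n) := by unfold Pre_peerin; infer_instance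
def pvWitness_peerin : Int := 5

def Spec_peerin (n : Int) (out : Int) : Prop := out = peerin_alt n
instance (n : Int) (out : Int) : Decidable (Spec_peerin n out) := by unfold Spec_peerin; infer_instance

-- ===== CLAIM (what is proved, stated in full; the proofs are below) =====
def Claim_equal_peerin : Prop := ∀ (n : Int), Dom_peerin n → Pre_peerin n → Spec_peerin n (peerin n)

-- ===== LEMMAS AND PROOFS =====
-- loop invariant: after m iterations the triple holds P m, P (m+1), P (m+2)
theorem peerinIter_spec (m : Nat) :
    peerinIter m = (peerinNat m, peerinNat (m + 1), peerinNat (m + 2)) := by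
  induction m with
  | zero => rfl
  | succ k ih =>
    have h : peerinIter (k + 1) = peerinStep (peerinIter k) := by
      simp [peerinIter, List.range_succ]
    rw [h, ih]
    simp [peerinStep, peerinNat]; ring

-- ===== VERDICT (by name: the statement is the Claim_ definition above) =====
theorem peerin_spec : Claim_equal_peerin := by
  intro n _ hpre
  unfold Spec_peerin peerin peerin_alt
  rcases eq_or_ne n 0 with rfl | h0
  · simp [peerinIter_spec]
  rcases eq_or_ne n 1 with rfl | h1
  · simp [peerinIter_spec]
  · have h2 : (n - 2).toNat + 2 = n.toNat ∨ n.toNat = 2 := by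
      unfold Pre_peerin at hpre; omega
    rcases h2 with h | h
    · simp [peerinIter_spec, h0, h1, ← h]
    · have hn : n = 2 := by unfold Pre_peerin at hpre; omega
      subst hn; simp [peerinIter_spec]
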